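-- pv_equiv track=rewrite | github.com/Andrzej-Alex/APK | Lab3.py | lab2_2
-- ===== SOURCE A (Python) =====
-- def lab2_2(x, y):
--     """Generuje ciąg liczb spełniających określone warunki.
--
--     Funkcja generuje ciąg liczb między x a y (włącznie), gdzie
--     każda liczba podzielna przez 7, ale niepodzielna przez 5, jest
--     dodawana do wynikowego ciągu. Wynikowy ciąg jest zwracany jako
--     jeden łańcuch znaków.
--
--     Args:
--         x (int): Początek zakresu.
--         y (int): Koniec zakresu.
--
--     Returns:
--         str: Ciąg liczb spełniających warunki, oddzielony przecinkami.
--             Jeśli podane wartości nie są liczbami całkowitymi, zwracany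
--             jest odpowiedni komunikat.
--     """
--     complete = ""
--     try:
--         for z in range(x, y + 1, 1):  # (obejmuje oba końce)
--             if z % 7 == 0:
--                 if z % 5 != 0:
--                     complete += f"{z}, "
--         return complete
--     except TypeError:
--         return "Jedna z podanych wartości nie jest liczbą całkowitą"
-- ===== SOURCE B (Python) =====
-- def lab2_2(x, y):
--     """Multiples of 7 in [x, y] not divisible by 5, joined with ', ' plus a trailing ', '."""
--     try:
--         lo = -((-x) // 7)   # ceil(x / 7); raises TypeError for non-numeric x
--         hi = y // 7         # floor(y / 7)
--         parts = [str(7 * k) for k in range(lo, hi + 1) if (7 * k) % 5 != 0]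
--     except TypeError:
--         return "Jedna z podanych wartości nie jest liczbą całkowitą"
--     return ", ".join(parts) + ", " if parts else ""
-- ===== Notes on version B (the rewrite author's own statement) =====
-- stated objective: faster
-- what changed: B enumerates the quotients k = ceil(x/7)..floor(y/7) via floor division, builds the list of str(7*k) for the non-multiples of 5 with a comprehension, and assembles the result with ', '.join plus a trailing separator, instead of scanning every integer in range(x, y+1) testing z % 7 while concatenating onto a string.
import Mathlib
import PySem

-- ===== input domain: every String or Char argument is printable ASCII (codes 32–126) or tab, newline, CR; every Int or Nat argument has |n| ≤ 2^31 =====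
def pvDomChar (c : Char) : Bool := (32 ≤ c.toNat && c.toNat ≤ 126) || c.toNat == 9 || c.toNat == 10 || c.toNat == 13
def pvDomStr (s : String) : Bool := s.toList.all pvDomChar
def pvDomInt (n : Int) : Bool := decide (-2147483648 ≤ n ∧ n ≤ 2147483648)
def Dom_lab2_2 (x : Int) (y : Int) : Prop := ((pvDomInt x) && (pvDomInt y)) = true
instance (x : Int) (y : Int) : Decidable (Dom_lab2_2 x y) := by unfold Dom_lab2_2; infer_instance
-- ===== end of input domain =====

-- B enumerates the quotients k = ceil(x/7)..floor(y/7) and joins str(7*k) with ", ",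
-- instead of scanning every integer and testing z % 7 while concatenating onto a string.
-- On Int arguments neither program raises (A's TypeError branch is unreachable), so no Pre_.

-- ===== PORT A =====
-- literal port: for z in range(x, y+1, 1): if z % 7 == 0: if z % 5 != 0: complete += f"{z}, "
def lab2_2 (x : Int) (y : Int) : String :=
  (PySem.List.pyRange x (y + 1) 1).foldl
    (fun complete z =>
      if PySem.Int.mod z 7 = 0 then
        if PySem.Int.mod z 5 ≠ 0 then complete ++ PySem.Int.toStr z ++ ", " else complete
      else complete) ""

-- ===== PORT B =====
-- literal port of Source B: lo/hi by floor division, a comprehension over k, then ", ".join + trailing ", "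
def lab2_2_alt (x : Int) (y : Int) : String :=
  let lo := -(PySem.Int.floordiv (-x) 7)
  let hi := PySem.Int.floordiv y 7
  let parts :=
    ((PySem.List.pyRange lo (hi + 1) 1).filter
        (fun k => decide (PySem.Int.mod (7 * k) 5 ≠ 0))).map
      (fun k => PySem.Int.toStr (7 * k))
  if parts = [] then "" else PySem.Str.join ", " parts ++ ", "

-- ===== PRECONDITION & SPEC =====
def Spec_lab2_2 (x : Int) (y : Int) (out : String) : Prop := out = lab2_2_alt x y
instance (x : Int) (y : Int) (out : String) : Decidable (Spec_lab2_2 x y out) := by unfold Spec_lab2_2; infer_instance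

-- ===== CLAIM (what is proved, stated in full; the proofs are below) =====
def Claim_equal_lab2_2 : Prop := ∀ (x : Int) (y : Int), Dom_lab2_2 x y → Spec_lab2_2 x y (lab2_2 x y)

-- ===== LEMMAS AND PROOFS =====

-- sep.join(ps) followed by one more sep is the concatenation of the (p ++ sep)s, for ps ≠ []
lemma join_append_sep (sep : List Char) (ps : List (List Char)) (h : ps ≠ []) :
    PySem.Chars.join sep ps ++ sep = (ps.map (· ++ sep)).flatten := by
  induction ps with
  | nil => exact absurd rfl h
  | cons p rest ih =>
    cases rest with
    | nil => simp [PySem.Chars.join_singleton]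
    | cons q r =>
      rw [PySem.Chars.join_cons_cons, List.append_assoc, List.append_assoc, ih (by simp)]
      simp

-- the multiples of 7 in [a, b) are exactly 7*k for k in [ceil(a/7), floor((b-1)/7)]
lemma filter7_eq_map (x y : Int) :
    (PySem.List.pyRange x (y + 1) 1).filter (fun z => decide (PySem.Int.mod z 7 = 0)) =
      (PySem.List.pyRange (-(PySem.Int.floordiv (-x) 7)) (PySem.Int.floordiv y 7 + 1) 1).map
        (fun k => 7 * k) := by
  have h7 : (0:Int) < 7 := by norm_num
  have hx : PySem.Int.floordiv (-x) 7 * 7 + PySem.Int.mod (-x) 7 = -x :=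
    PySem.Int.floordiv_mul_add_mod _ _
  have hxm0 : 0 ≤ PySem.Int.mod (-x) 7 := PySem.Int.mod_nonneg _ h7
  have hxm7 : PySem.Int.mod (-x) 7 < 7 := PySem.Int.mod_lt _ h7
  have hy : PySem.Int.floordiv y 7 * 7 + PySem.Int.mod y 7 = y :=
    PySem.Int.floordiv_mul_add_mod _ _
  have hym0 : 0 ≤ PySem.Int.mod y 7 := PySem.Int.mod_nonneg _ h7
  have hym7 : PySem.Int.mod y 7 < 7 := PySem.Int.mod_lt _ h7
  set lo := -(PySem.Int.floordiv (-x) 7) with hlo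
  set hi := PySem.Int.floordiv y 7 with hhi
  have pl : ((PySem.List.pyRange x (y + 1) 1).filter
      (fun z => decide (PySem.Int.mod z 7 = 0))).Pairwise (· < ·) :=
    (PySem.List.pairwise_lt_pyRange_one x (y + 1)).filter _
  have pr : ((PySem.List.pyRange lo (hi + 1) 1).map (fun k => 7 * k)).Pairwise (· < ·) :=
    (PySem.List.pairwise_lt_pyRange_one lo (hi + 1)).map _ (by intro a b hab; omega)
  have perm : ((PySem.List.pyRange lo (hi + 1) 1).map (fun k => 7 * k)).Perm
      ((PySem.List.pyRange x (y + 1) 1).filter (fun z => decide (PySem.Int.mod z 7 = 0))) := by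
    rw [List.perm_ext_iff_of_nodup
      (pr.imp (fun h => ne_of_lt h)) (pl.imp (fun h => ne_of_lt h))]
    intro z
    rw [List.mem_filter, List.mem_map, PySem.List.mem_pyRange_one, decide_eq_true_iff,
      PySem.Int.mod_eq_zero_iff_dvd]
    constructor
    · rintro ⟨k, hk, rfl⟩
      rw [PySem.List.mem_pyRange_one] at hk
      exact ⟨⟨by omega, by omega⟩, ⟨k, rfl⟩⟩
    · rintro ⟨⟨h1, h2⟩, k, rfl⟩
      exact ⟨k, by rw [PySem.List.mem_pyRange_one]; omega, rfl⟩
  calc (PySem.List.pyRange x (y + 1) 1).filter (fun z => decide (PySem.Int.mod z 7 = 0))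
      = PySem.List.sorted ((PySem.List.pyRange x (y + 1) 1).filter
          (fun z => decide (PySem.Int.mod z 7 = 0))) id := by
        rw [PySem.List.sorted_eq_of_perm_of_pairwise_lt _ _ id (List.Perm.refl _)
          (by simpa using pl)]
    _ = (PySem.List.pyRange lo (hi + 1) 1).map (fun k => 7 * k) := by
        rw [PySem.List.sorted_eq_of_perm_of_pairwise_lt _ _ id perm (by simpa using pr)]

-- push .toList through B-shaped accumulating string folds
lemma toList_foldl_str {A : Type} (L : List A) (g : A → Int) (c : String) :
    (L.foldl (fun complete k => complete ++ PySem.Int.toStr (g k) ++ ", ") c).toList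
    = L.foldl (fun cs k => cs ++ (PySem.Int.toChars (g k) ++ [',', ' '])) c.toList := by
  induction L generalizing c with
  | nil => rfl
  | cons k rest ih =>
    simp only [List.foldl_cons]
    rw [ih]
    simp [PySem.Int.toList_toStr]

theorem lab2_2_spec_aux (x y : Int) : lab2_2 x y = lab2_2_alt x y := by
  unfold lab2_2
  rw [PySem.List.foldl_ite_eq_foldl_filter (fun z => PySem.Int.mod z 7 = 0)
    (fun complete z =>
      if PySem.Int.mod z 5 ≠ 0 then complete ++ PySem.Int.toStr z ++ ", " else complete)]
  rw [filter7_eq_map x y, List.foldl_map]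
  rw [PySem.List.foldl_ite_eq_foldl_filter (fun k => PySem.Int.mod (7 * k) 5 ≠ 0)
    (fun complete k => complete ++ PySem.Int.toStr (7 * k) ++ ", ")]
  set F := (PySem.List.pyRange (-(PySem.Int.floordiv (-x) 7)) (PySem.Int.floordiv y 7 + 1)
      1).filter (fun k => decide (PySem.Int.mod (7 * k) 5 ≠ 0)) with hF
  have hRHS : lab2_2_alt x y =
      (if F.map (fun k => PySem.Int.toStr (7 * k)) = [] then ""
       else PySem.Str.join ", " (F.map (fun k => PySem.Int.toStr (7 * k))) ++ ", ") := rfl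
  rw [hRHS]
  by_cases hFe : F = []
  · simp [hFe]
  · rw [if_neg (by simp [hFe])]
    rw [← String.toList_inj, toList_foldl_str F (fun k => 7 * k)]
    rw [PySem.List.foldl_append_eq_flatMap]
    have hjoin : (PySem.Str.join ", " (F.map (fun k => PySem.Int.toStr (7 * k))) ++ ", ").toList
        = PySem.Chars.join [',', ' ']
            ((F.map (fun k => PySem.Int.toStr (7 * k))).map String.toList) ++ [',', ' '] := by
      simp [PySem.Str.toList_join]
    rw [hjoin, join_append_sep _ _ (by simp [hFe])]
    simp [List.flatMap, Function.comp_def, PySem.Int.toList_toStr]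

-- ===== VERDICT (by name: the statement is the Claim_ definition above) =====
theorem lab2_2_spec : Claim_equal_lab2_2 := by
  intro x y _
  exact lab2_2_spec_aux x y
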